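-- pv_equiv track=rewrite | github.com/freddysundowner/banky | python_backend/services/feature_flags.py | get_feature_category
-- ===== SOURCE A (Python) =====
-- from enum import Enum
--
-- class Feature(str, Enum):
--     CORE_BANKING = "core_banking"
--     MEMBERS = "members"
--     SAVINGS = "savings"
--     SHARES = "shares"
--     LOANS = "loans"
--     TELLER_STATION = "teller_station"
--     FLOAT_MANAGEMENT = "float_management"
--     FIXED_DEPOSITS = "fixed_deposits"
--     DIVIDENDS = "dividends"
--     ANALYTICS = "analytics"
--     ANALYTICS_EXPORT = "analytics_export"
--     SMS_NOTIFICATIONS = "sms_notifications"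
--     BULK_SMS = "bulk_sms"
--     EXPENSES = "expenses"
--     LEAVE_MANAGEMENT = "leave_management"
--     PAYROLL = "payroll"
--     ACCOUNTING = "accounting"
--     AUDIT_LOGS = "audit_logs"
--     MULTIPLE_BRANCHES = "multiple_branches"
--     API_ACCESS = "api_access"
--     WHITE_LABEL = "white_label"
--     CUSTOM_REPORTS = "custom_reports"
--     MPESA_INTEGRATION = "mpesa_integration"
--     BANK_INTEGRATION = "bank_integration"
--     CRM = "crm"
--     COLLATERAL = "collateral"
--
-- def get_feature_category(feature: Feature) -> str:
--     categories = {
--         "core": [Feature.CORE_BANKING, Feature.MEMBERS, Feature.SAVINGS, Feature.SHARES],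
--         "loans": [Feature.LOANS],
--         "operations": [Feature.TELLER_STATION, Feature.FLOAT_MANAGEMENT],
--         "products": [Feature.FIXED_DEPOSITS, Feature.DIVIDENDS],
--         "communication": [Feature.SMS_NOTIFICATIONS, Feature.BULK_SMS],
--         "hr": [Feature.EXPENSES, Feature.LEAVE_MANAGEMENT, Feature.PAYROLL],
--         "finance": [Feature.ACCOUNTING],
--         "reporting": [Feature.ANALYTICS, Feature.ANALYTICS_EXPORT, Feature.CUSTOM_REPORTS],
--         "advanced": [Feature.MULTIPLE_BRANCHES, Feature.API_ACCESS, Feature.WHITE_LABEL],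
--         "integrations": [Feature.MPESA_INTEGRATION, Feature.BANK_INTEGRATION],
--         "security": [Feature.AUDIT_LOGS],
--         "crm": [Feature.CRM],
--         "collateral": [Feature.COLLATERAL]
--     }
--
--     for category, features in categories.items():
--         if feature in features:
--             return category
--     return "other"
-- ===== SOURCE B (Python) =====
-- # Inverted lookup table: feature value -> category name, built once; a single
-- # dict lookup with default "other" replaces A's per-category membership scan.
-- _FEATURE_TO_CATEGORY = {
--     "core_banking": "core",
--     "members": "core",
--     "savings": "core",
--     "shares": "core",
--     "loans": "loans",
--     "teller_station": "operations",
--     "float_management": "operations",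
--     "fixed_deposits": "products",
--     "dividends": "products",
--     "sms_notifications": "communication",
--     "bulk_sms": "communication",
--     "expenses": "hr",
--     "leave_management": "hr",
--     "payroll": "hr",
--     "accounting": "finance",
--     "analytics": "reporting",
--     "analytics_export": "reporting",
--     "custom_reports": "reporting",
--     "multiple_branches": "advanced",
--     "api_access": "advanced",
--     "white_label": "advanced",
--     "mpesa_integration": "integrations",
--     "bank_integration": "integrations",
--     "audit_logs": "security",
--     "crm": "crm",
--     "collateral": "collateral",
-- }
--
-- def get_feature_category(feature) -> str:
--     return _FEATURE_TO_CATEGORY.get(feature, "other")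
-- ===== Notes on version B (the rewrite author's own statement) =====
-- stated objective: idiomatic
-- what changed: Replaced A's loop over category->feature-list pairs with per-category membership scans by a module-level inverted feature->category dict consulted with a single lookup that falls back to the same default category name.
import Mathlib
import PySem

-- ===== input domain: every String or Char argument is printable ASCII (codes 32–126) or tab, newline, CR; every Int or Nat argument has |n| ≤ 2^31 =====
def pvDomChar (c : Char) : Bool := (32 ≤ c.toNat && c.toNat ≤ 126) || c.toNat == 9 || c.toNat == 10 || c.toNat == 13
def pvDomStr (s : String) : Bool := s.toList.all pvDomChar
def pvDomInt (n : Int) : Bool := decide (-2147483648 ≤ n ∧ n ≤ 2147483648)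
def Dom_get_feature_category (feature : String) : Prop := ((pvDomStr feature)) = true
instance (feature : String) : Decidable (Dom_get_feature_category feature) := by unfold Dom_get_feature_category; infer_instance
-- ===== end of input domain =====

-- B replaces A's category-by-category membership loop with a precomputed inverted
-- feature->category dictionary consulted by a single lookup with the same fallback (idiomatic).

-- ===== PORT A =====
-- the literal categories dict of A, as an insertion-ordered association list
def pvCategories : List (String × List String) :=
  [("core", ["core_banking", "members", "savings", "shares"]),
   ("loans", ["loans"]),
   ("operations", ["teller_station", "float_management"]),
   ("products", ["fixed_deposits", "dividends"]),
   ("communication", ["sms_notifications", "bulk_sms"]),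
   ("hr", ["expenses", "leave_management", "payroll"]),
   ("finance", ["accounting"]),
   ("reporting", ["analytics", "analytics_export", "custom_reports"]),
   ("advanced", ["multiple_branches", "api_access", "white_label"]),
   ("integrations", ["mpesa_integration", "bank_integration"]),
   ("security", ["audit_logs"]),
   ("crm", ["crm"]),
   ("collateral", ["collateral"])]

-- the 'for category, features in categories.items(): if feature in features: return category' loop
def pvLoopA (feature : String) : List (String × List String) → String
  | [] => "other"
  | (category, features) :: rest =>
      if feature ∈ features then category else pvLoopA feature rest

def get_feature_category (feature : String) : String :=
  pvLoopA feature pvCategories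

-- ===== PORT B =====
-- the literal inverted dict _FEATURE_TO_CATEGORY of Source B
def pvFeatureToCategory : PySem.Dict String String :=
  PySem.Dict.ofList
    [("core_banking", "core"), ("members", "core"), ("savings", "core"), ("shares", "core"),
     ("loans", "loans"),
     ("teller_station", "operations"), ("float_management", "operations"),
     ("fixed_deposits", "products"), ("dividends", "products"),
     ("sms_notifications", "communication"), ("bulk_sms", "communication"),
     ("expenses", "hr"), ("leave_management", "hr"), ("payroll", "hr"),
     ("accounting", "finance"),
     ("analytics", "reporting"), ("analytics_export", "reporting"), ("custom_reports", "reporting"),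
     ("multiple_branches", "advanced"), ("api_access", "advanced"), ("white_label", "advanced"),
     ("mpesa_integration", "integrations"), ("bank_integration", "integrations"),
     ("audit_logs", "security"),
     ("crm", "crm"),
     ("collateral", "collateral")]

def get_feature_category_alt (feature : String) : String :=
  PySem.Dict.getD pvFeatureToCategory feature "other"

-- ===== PRECONDITION & SPEC =====
def Spec_get_feature_category (feature : String) (out : String) : Prop := out = get_feature_category_alt feature
instance (feature : String) (out : String) : Decidable (Spec_get_feature_category feature out) := by unfold Spec_get_feature_category; infer_instance

-- ===== CLAIM (what is proved, stated in full; the proofs are below) =====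
def Claim_equal_get_feature_category : Prop := ∀ (feature : String), Dom_get_feature_category feature → Spec_get_feature_category feature (get_feature_category feature)

-- ===== LEMMAS AND PROOFS =====

-- the inverted dict's key list, computed once
theorem pvKeys_eq : pvFeatureToCategory.keys = ["core_banking", "members", "savings", "shares", "loans", "teller_station", "float_management", "fixed_deposits", "dividends", "sms_notifications", "bulk_sms", "expenses", "leave_management", "payroll", "accounting", "analytics", "analytics_export", "custom_reports", "multiple_branches", "api_access", "white_label", "mpesa_integration", "bank_integration", "audit_logs", "crm", "collateral"] := by decide

-- ===== VERDICT (by name: the statement is the Claim_ definition above) =====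
theorem get_feature_category_spec : Claim_equal_get_feature_category := by
  intro feature _
  unfold Spec_get_feature_category
  by_cases hm : feature ∈ pvFeatureToCategory.keys
  · rw [pvKeys_eq] at hm
    simp only [List.mem_cons, List.not_mem_nil, or_false] at hm
    rcases hm with rfl|rfl|rfl|rfl|rfl|rfl|rfl|rfl|rfl|rfl|rfl|rfl|rfl|rfl|rfl|rfl|rfl|rfl|rfl|rfl|rfl|rfl|rfl|rfl|rfl|rfl <;> decide
  · have hb : get_feature_category_alt feature = "other" := by
      unfold get_feature_category_alt
      rw [PySem.Dict.getD_eq_get?_getD,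
        (PySem.Dict.get?_eq_none_iff_not_mem_keys _ _).mpr hm]
      rfl
    rw [pvKeys_eq] at hm
    simp only [List.mem_cons, List.not_mem_nil, or_false, not_or] at hm
    obtain ⟨h1, h2, h3, h4, h5, h6, h7, h8, h9, h10, h11, h12, h13, h14, h15, h16, h17, h18, h19, h20, h21, h22, h23, h24, h25, h26⟩ := hm
    unfold get_feature_category
    simp only [pvLoopA, pvCategories, List.mem_cons, List.not_mem_nil,
      h1, h2, h3, h4, h5, h6, h7, h8, h9, h10, h11, h12, h13, h14, h15, h16, h17,
      h18, h19, h20, h21, h22, h23, h24, h25, h26, if_false, or_self]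
    exact hb.symm
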